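-- pv_equiv track=rewrite | github.com/rsk170/synthea-v3.3-genomics-pipeline | scripts/build_breast_cancer_clone_proportions_v2.py | parse_signature_key
-- ===== SOURCE A (Python) =====
-- def parse_signature_key(signature_key: str, timepoint_count: int) -> tuple[str, ...]:
--     if signature_key == "implicit:founder":
--         if timepoint_count <= 0:
--             return tuple()
--         return tuple(["present", *["unknown"] * (timepoint_count - 1)])
--
--     states_by_index: dict[int, str] = {}
--     for part in signature_key.split("|"):
--         if ":" not in part:
--             continue
--         label, state = part.split(":", 1)
--         if label.startswith("t") and label[1:].isdigit():
--             states_by_index[int(label[1:])] = state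
--
--     if not states_by_index:
--         return tuple(["present", *["unknown"] * max(0, timepoint_count - 1)])
--
--     max_index = max(states_by_index)
--     states = []
--     for index in range(max(max_index + 1, timepoint_count)):
--         if index == 0:
--             states.append(states_by_index.get(index, "present"))
--         else:
--             states.append(states_by_index.get(index, "unknown"))
--     return tuple(states)
-- ===== SOURCE B (Python) =====
-- def parse_signature_key(signature_key: str, timepoint_count: int) -> tuple[str, ...]:
--     if signature_key == "implicit:founder":
--         if timepoint_count <= 0:
--             return tuple()
--         return ("present",) + ("unknown",) * (timepoint_count - 1)
--
--     parts = signature_key.split("|")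
--
--     def parsed(part):
--         if ":" not in part:
--             return None
--         label, state = part.split(":", 1)
--         if label.startswith("t") and label[1:].isdigit():
--             return int(label[1:]), state
--         return None
--
--     max_index = -1
--     for part in parts:
--         entry = parsed(part)
--         if entry is not None and entry[0] > max_index:
--             max_index = entry[0]
--
--     if max_index < 0:
--         return ("present",) + ("unknown",) * max(0, timepoint_count - 1)
--
--     def state_at(index):
--         result = "present" if index == 0 else "unknown"
--         for part in parts:
--             entry = parsed(part)
--             if entry is not None and entry[0] == index:
--                 result = entry[1]
--         return result
--
--     return tuple(state_at(index) for index in range(max(max_index + 1, timepoint_count)))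
-- ===== Notes on version B (the rewrite author's own statement) =====
-- stated objective: alternative
-- what changed: B removes the dict and any intermediate entry store: it computes the maximum timepoint index in one scan over the split parts, then for each output position rescans the parts and keeps the state of the last part whose parsed index equals that position (nested scans replacing the hash index; last match wins exactly as dict overwrite does).
import Mathlib
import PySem

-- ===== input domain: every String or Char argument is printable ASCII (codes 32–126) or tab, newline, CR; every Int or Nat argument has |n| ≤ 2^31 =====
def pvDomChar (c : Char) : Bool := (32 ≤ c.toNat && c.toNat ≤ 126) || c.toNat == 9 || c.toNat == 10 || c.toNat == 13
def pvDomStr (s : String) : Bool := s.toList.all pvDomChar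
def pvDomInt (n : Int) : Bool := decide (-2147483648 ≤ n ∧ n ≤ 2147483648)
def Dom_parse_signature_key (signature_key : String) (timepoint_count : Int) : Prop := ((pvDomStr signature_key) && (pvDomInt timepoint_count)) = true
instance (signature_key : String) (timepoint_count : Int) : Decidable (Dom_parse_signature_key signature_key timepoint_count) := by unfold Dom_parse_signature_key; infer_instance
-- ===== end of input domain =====

-- B drops A's dict entirely: one scan computes the maximum parsed index, then each
-- output position rescans the parts for its last matching entry (objective: alternative).

-- ===== PORT A =====
-- body of A's for-loop: one '|'-separated part folded into the dict.
-- label = ((splitMax? part ":" 1).getD []).headD "", state = ....getD 1 "":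
-- ":" is in part there, so part.split(":", 1) yields exactly [label, state].
def pvStepA (d : PySem.Dict Int String) (part : String) : PySem.Dict Int String :=
  if PySem.Str.isIn ":" part = false then d
  else
    if PySem.Str.startswith (((PySem.Str.splitMax? part ":" 1).getD []).headD "") "t"
        && PySem.Str.strIsdigit (PySem.Str.slice (((PySem.Str.splitMax? part ":" 1).getD []).headD "") (some 1) none) then
      -- int(label[1:]): isdigit holds there, so ofStr? is some and the getD 0 default is never taken
      d.insert ((PySem.Int.ofStr? (PySem.Str.slice (((PySem.Str.splitMax? part ":" 1).getD []).headD "") (some 1) none)).getD 0)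
        (((PySem.Str.splitMax? part ":" 1).getD []).getD 1 "")
    else d

def parse_signature_key (signature_key : String) (timepoint_count : Int) : List String :=
  if signature_key = "implicit:founder" then
    if timepoint_count ≤ 0 then []
    else "present" :: List.replicate (timepoint_count - 1).toNat "unknown"
  else
    if (((PySem.Str.split? signature_key "|").getD []).foldl pvStepA PySem.Dict.empty).size = 0 then
      "present" :: List.replicate (max 0 (timepoint_count - 1)).toNat "unknown"
    else
      -- max(states_by_index) iterates the keys; the dict is nonempty here, getD 0 is never taken
      (PySem.List.pyRange 0
          (max ((PySem.List.max? ((((PySem.Str.split? signature_key "|").getD []).foldl pvStepA PySem.Dict.empty).keys) (fun k => k)).getD 0 + 1)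
            timepoint_count) 1).foldl
        (fun states index =>
          if index = 0 then
            states ++ [(((PySem.Str.split? signature_key "|").getD []).foldl pvStepA PySem.Dict.empty).getD index "present"]
          else
            states ++ [(((PySem.Str.split? signature_key "|").getD []).foldl pvStepA PySem.Dict.empty).getD index "unknown"]) []

-- ===== PORT B =====
-- B's helper parsed(part): None, or (int(label[1:]), state)
def pvParsedB (part : String) : Option (Int × String) :=
  if PySem.Str.isIn ":" part = false then none
  else
    if PySem.Str.startswith (((PySem.Str.splitMax? part ":" 1).getD []).headD "") "t"
        && PySem.Str.strIsdigit (PySem.Str.slice (((PySem.Str.splitMax? part ":" 1).getD []).headD "") (some 1) none) then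
      some ((PySem.Int.ofStr? (PySem.Str.slice (((PySem.Str.splitMax? part ":" 1).getD []).headD "") (some 1) none)).getD 0,
        ((PySem.Str.splitMax? part ":" 1).getD []).getD 1 "")
    else none

-- body of B's first loop: running maximum of parsed indices
def pvMaxStepB (max_index : Int) (part : String) : Int :=
  match pvParsedB part with
  | none => max_index
  | some entry => if entry.1 > max_index then entry.1 else max_index

-- B's helper state_at(index): last matching part wins
def pvStateAtB (parts : List String) (index : Int) : String :=
  parts.foldl
    (fun result part =>
      match pvParsedB part with
      | none => result
      | some entry => if entry.1 = index then entry.2 else result)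
    (if index = 0 then "present" else "unknown")

def parse_signature_key_alt (signature_key : String) (timepoint_count : Int) : List String :=
  if signature_key = "implicit:founder" then
    if timepoint_count ≤ 0 then []
    else "present" :: List.replicate (timepoint_count - 1).toNat "unknown"
  else
    let parts := (PySem.Str.split? signature_key "|").getD []
    if parts.foldl pvMaxStepB (-1) < 0 then
      "present" :: List.replicate (max 0 (timepoint_count - 1)).toNat "unknown"
    else
      (PySem.List.pyRange 0 (max (parts.foldl pvMaxStepB (-1) + 1) timepoint_count) 1).map
        (pvStateAtB parts)

-- ===== PRECONDITION & SPEC =====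
def Spec_parse_signature_key (signature_key : String) (timepoint_count : Int) (out : List String) : Prop := out = parse_signature_key_alt signature_key timepoint_count
instance (signature_key : String) (timepoint_count : Int) (out : List String) : Decidable (Spec_parse_signature_key signature_key timepoint_count out) := by unfold Spec_parse_signature_key; infer_instance

-- ===== CLAIM (what is proved, stated in full; the proofs are below) =====
def Claim_equal_parse_signature_key : Prop := ∀ (signature_key : String) (timepoint_count : Int), Dom_parse_signature_key signature_key timepoint_count → Spec_parse_signature_key signature_key timepoint_count (parse_signature_key signature_key timepoint_count)

-- ===== LEMMAS AND PROOFS =====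

-- proof-side list of the parsed (index, state) entries in order
def pvEntries (parts : List String) : List (Int × String) :=
  parts.foldl (fun es part => match pvParsedB part with | none => es | some p => es ++ [p]) []

theorem pvFoldl_congr {α β : Type} {f g : β → α → β} (l : List α) (b : β)
    (h : ∀ b a, f b a = g b a) : l.foldl f b = l.foldl g b := by
  induction l generalizing b with
  | nil => rfl
  | cons a l ih => rw [List.foldl_cons, List.foldl_cons, h, ih]

theorem pvEntries_append (parts : List String) (es : List (Int × String)) :
    parts.foldl (fun es part => match pvParsedB part with | none => es | some p => es ++ [p]) es
      = es ++ pvEntries parts := by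
  induction parts generalizing es with
  | nil => simp [pvEntries]
  | cons part parts ih =>
    have h1 : pvEntries (part :: parts)
        = parts.foldl (fun es part => match pvParsedB part with | none => es | some p => es ++ [p])
            (match pvParsedB part with | none => [] | some p => [] ++ [p]) := rfl
    rw [List.foldl_cons, ih, h1, ih (match pvParsedB part with | none => [] | some p => [] ++ [p])]
    cases pvParsedB part <;> simp

-- any fold over the parts through pvParsedB is a fold over pvEntries
theorem pvFold_via_entries {β : Type} (f : β → Int × String → β) (parts : List String) (b0 : β) :
    parts.foldl (fun b part => match pvParsedB part with | none => b | some p => f b p) b0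
      = (pvEntries parts).foldl f b0 := by
  induction parts generalizing b0 with
  | nil => rfl
  | cons part parts ih =>
    have h1 : pvEntries (part :: parts)
        = parts.foldl (fun es part => match pvParsedB part with | none => es | some p => es ++ [p])
            (match pvParsedB part with | none => [] | some p => [] ++ [p]) := rfl
    rw [List.foldl_cons, h1, pvEntries_append]
    cases pvParsedB part with
    | none => rw [ih]; rfl
    | some p => rw [ih]; rfl

theorem pvStepA_classify (d : PySem.Dict Int String) (part : String) :
    pvStepA d part = match pvParsedB part with
      | none => d
      | some p => d.insert p.1 p.2 := by
  unfold pvStepA pvParsedB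
  by_cases h1 : PySem.Str.isIn ":" part = false
  · rw [if_pos h1, if_pos h1]
  · rw [if_neg h1, if_neg h1]
    by_cases h2 : (PySem.Str.startswith (((PySem.Str.splitMax? part ":" 1).getD []).headD "") "t"
        && PySem.Str.strIsdigit (PySem.Str.slice (((PySem.Str.splitMax? part ":" 1).getD []).headD "") (some 1) none)) = true
    · rw [if_pos h2, if_pos h2]
    · rw [if_neg h2, if_neg h2]

theorem pvFoldA_eq (parts : List String) (d : PySem.Dict Int String) :
    parts.foldl pvStepA d = (pvEntries parts).foldl (fun d p => d.insert p.1 p.2) d := by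
  have h : parts.foldl pvStepA d
      = parts.foldl (fun d part => match pvParsedB part with
          | none => d
          | some p => d.insert p.1 p.2) d := by
    exact pvFoldl_congr _ _ pvStepA_classify
  rw [h, pvFold_via_entries]

theorem pvOptNat (X : Option Nat) :
    0 ≤ (Option.map (fun n : Int => n) (do let a ← X; pure ((a : Int)))).getD 0 := by
  cases X <;> simp

theorem pvOfChars_nonneg (cs : List Char) (h : PySem.Chars.strIsdigit cs = true) :
    0 ≤ (PySem.Int.ofChars? cs).getD 0 := by
  have hall : ∀ c ∈ cs, PySem.Chars.isdigit c = true := by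
    simp only [PySem.Chars.strIsdigit, Bool.and_eq_true, List.all_eq_true] at h
    exact h.2
  have hns : ∀ c ∈ cs, PySem.Int.isIntSpace c = false := by
    intro c hc
    have hd := hall c hc
    simp only [PySem.Int.isIntSpace, Bool.or_eq_false_iff, decide_eq_false_iff_not]
    refine ⟨⟨⟨⟨⟨?_, ?_⟩, ?_⟩, ?_⟩, ?_⟩, ?_⟩ <;> rintro rfl <;> exact absurd hd (by decide)
  have hns' : ∀ c ∈ cs.reverse, PySem.Int.isIntSpace c = false := by
    intro c hc; exact hns c (List.mem_reverse.mp hc)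
  have hd1 : List.dropWhile PySem.Int.isIntSpace cs = cs := by
    rw [List.dropWhile_eq_self_iff]
    intro hl hx
    rw [hns _ (List.getElem_mem hl)] at hx
    exact Bool.false_ne_true hx
  have hd2 : List.dropWhile PySem.Int.isIntSpace cs.reverse = cs.reverse := by
    rw [List.dropWhile_eq_self_iff]
    intro hl hx
    rw [hns' _ (List.getElem_mem hl)] at hx
    exact Bool.false_ne_true hx
  simp only [PySem.Int.ofChars?, hd1, hd2, List.reverse_reverse]
  split
  all_goals first
    | exact pvOptNat _
    | (exfalso
       exact absurd (hall '-' (List.mem_cons_self ..)) (by decide))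

theorem pvOfStr_nonneg (s : String) (h : PySem.Str.strIsdigit s = true) :
    0 ≤ (PySem.Int.ofStr? s).getD 0 := by
  have h' : PySem.Chars.strIsdigit s.toList = true := by
    rw [← PySem.Str.strIsdigit_eq]; exact h
  have he := PySem.Int.ofStr?_ofList s.toList
  rw [String.ofList_toList] at he
  rw [he]
  exact pvOfChars_nonneg _ h'

theorem pvParsedB_nonneg {part : String} {p : Int × String}
    (h : pvParsedB part = some p) : 0 ≤ p.1 := by
  unfold pvParsedB at h
  by_cases h1 : PySem.Str.isIn ":" part = false
  · rw [if_pos h1] at h; exact absurd h (by simp)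
  · rw [if_neg h1] at h
    by_cases h2 : (PySem.Str.startswith (((PySem.Str.splitMax? part ":" 1).getD []).headD "") "t"
        && PySem.Str.strIsdigit (PySem.Str.slice (((PySem.Str.splitMax? part ":" 1).getD []).headD "") (some 1) none)) = true
    · rw [if_pos h2] at h
      injection h with h3
      rw [← h3]
      simpa using pvOfStr_nonneg _ ((Bool.and_eq_true _ _).mp h2).2
    · rw [if_neg h2] at h; exact absurd h (by simp)

theorem pvEntries_nonneg (parts : List String) :
    ∀ p ∈ pvEntries parts, 0 ≤ p.1 := by
  have h : ∀ es : List (Int × String), (∀ p ∈ es, 0 ≤ p.1) →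
      ∀ p ∈ parts.foldl (fun es part => match pvParsedB part with | none => es | some p => es ++ [p]) es, 0 ≤ p.1 := by
    induction parts with
    | nil => intro es hes; exact hes
    | cons part parts ih =>
      intro es hes
      simp only [List.foldl_cons]
      refine ih _ ?_
      cases hc : pvParsedB part with
      | none => exact hes
      | some p =>
        intro q hq
        rcases List.mem_append.1 hq with hq | hq
        · exact hes q hq
        · simp only [List.mem_singleton] at hq
          exact hq ▸ pvParsedB_nonneg hc
  exact h [] (by simp)

-- keys of the fold-built dict are exactly the entry keys
theorem pvKeys_fold (es : List (Int × String)) (d : PySem.Dict Int String) (k : Int) :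
    k ∈ (es.foldl (fun d p => d.insert p.1 p.2) d).keys ↔ k ∈ d.keys ∨ k ∈ es.map Prod.fst := by
  induction es generalizing d with
  | nil => simp
  | cons p es ih =>
    simp only [List.foldl_cons, ih, PySem.Dict.mem_keys_insert, List.map_cons, List.mem_cons]
    tauto

theorem pvSizeInsertPos (d : PySem.Dict Int String) (k : Int) (v : String) :
    0 < (d.insert k v).size := by
  rw [PySem.Dict.size_insert]
  split_ifs with hc
  · cases hitems : d.items with
    | nil =>
      exfalso
      have hk : k ∈ d.keys := by
        have h := PySem.Dict.contains_eq_decide_mem_keys d k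
        rw [hc] at h
        exact of_decide_eq_true h.symm
      simp [PySem.Dict.keys, hitems] at hk
    | cons a l => simp [PySem.Dict.size, hitems]
  · omega

theorem pvSize_fold_zero (es : List (Int × String)) (d : PySem.Dict Int String) :
    (es.foldl (fun d p => d.insert p.1 p.2) d).size = 0 ↔ es = [] ∧ d.size = 0 := by
  induction es generalizing d with
  | nil => simp
  | cons p es ih =>
    simp only [List.foldl_cons, ih]
    have hpos := pvSizeInsertPos d p.1 p.2
    constructor
    · rintro ⟨_, h2⟩; omega
    · rintro ⟨h, _⟩; exact absurd h (List.cons_ne_nil _ _)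

-- running-maximum fold: lower bounds and membership
theorem pvFoldMax_ge_init (es : List (Int × String)) (m : Int) :
    m ≤ es.foldl (fun m p => if p.1 > m then p.1 else m) m := by
  induction es generalizing m with
  | nil => simp
  | cons p es ih =>
    simp only [List.foldl_cons]
    refine le_trans ?_ (ih _)
    split_ifs with h <;> omega

theorem pvFoldMax_ge_mem (es : List (Int × String)) (m : Int) :
    ∀ p ∈ es, p.1 ≤ es.foldl (fun m p => if p.1 > m then p.1 else m) m := by
  induction es generalizing m with
  | nil => simp
  | cons q es ih =>
    intro p hp
    simp only [List.foldl_cons]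
    rcases List.mem_cons.1 hp with rfl | hp
    · refine le_trans ?_ (pvFoldMax_ge_init es _)
      split_ifs with h <;> omega
    · exact ih _ p hp

theorem pvFoldMax_cases (es : List (Int × String)) (m : Int) :
    es.foldl (fun m p => if p.1 > m then p.1 else m) m = m
      ∨ ∃ p ∈ es, es.foldl (fun m p => if p.1 > m then p.1 else m) m = p.1 := by
  induction es generalizing m with
  | nil => left; rfl
  | cons q es ih =>
    simp only [List.foldl_cons]
    rcases ih (if q.1 > m then q.1 else m) with h | ⟨p, hp, h⟩
    · by_cases hq : q.1 > m
      · right; exact ⟨q, List.mem_cons_self .., by rw [h, if_pos hq]⟩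
      · left; rw [h, if_neg hq]
    · right; exact ⟨p, List.mem_cons_of_mem _ hp, h⟩

-- nonempty entries: the running maximum from -1 equals max(states_by_index)
theorem pvFoldMax_eq_max? (es : List (Int × String)) (hne : es ≠ [])
    (hnn : ∀ p ∈ es, 0 ≤ p.1) :
    es.foldl (fun m p => if p.1 > m then p.1 else m) (-1)
      = (PySem.List.max? (es.map Prod.fst) (fun k => k)).getD 0 := by
  obtain ⟨m2, hm2⟩ : ∃ m, PySem.List.max? (es.map Prod.fst) (fun k => k) = some m := by
    cases h : PySem.List.max? (es.map Prod.fst) (fun k => k) with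
    | none => exact absurd ((PySem.List.max?_eq_none_iff _ _).1 h) (by simpa using hne)
    | some m => exact ⟨m, rfl⟩
  rw [hm2, Option.getD_some]
  obtain ⟨q, hq, hqe⟩ := List.mem_map.1 (PySem.List.max?_mem hm2)
  have h1 : m2 ≤ es.foldl (fun m p => if p.1 > m then p.1 else m) (-1) :=
    hqe ▸ pvFoldMax_ge_mem es (-1) q hq
  have h2 : es.foldl (fun m p => if p.1 > m then p.1 else m) (-1) ≤ m2 := by
    rcases pvFoldMax_cases es (-1) with h | ⟨p, hp, h⟩
    · have h0 : (0 : Int) ≤ m2 := hqe ▸ hnn q hq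
      rw [h]; omega
    · rw [h]
      simpa using PySem.List.max?_isMax hm2 p.1 (List.mem_map_of_mem hp)
  omega

-- the keys' maximum over the dict equals the one over the entry list
theorem pvMax_eq (es : List (Int × String)) (hne : es ≠ []) :
    (PySem.List.max? ((es.foldl (fun d p => d.insert p.1 p.2) PySem.Dict.empty).keys) (fun k => k)).getD 0
      = (PySem.List.max? (es.map Prod.fst) (fun k => k)).getD 0 := by
  have hkeys : ∀ k : Int,
      k ∈ (es.foldl (fun d p => d.insert p.1 p.2) PySem.Dict.empty).keys ↔ k ∈ es.map Prod.fst := by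
    intro k
    rw [pvKeys_fold]
    simp [PySem.Dict.keys, PySem.Dict.empty]
  obtain ⟨m2, hm2⟩ : ∃ m, PySem.List.max? (es.map Prod.fst) (fun k => k) = some m := by
    cases h : PySem.List.max? (es.map Prod.fst) (fun k => k) with
    | none => exact absurd ((PySem.List.max?_eq_none_iff _ _).1 h) (by simpa using hne)
    | some m => exact ⟨m, rfl⟩
  obtain ⟨m1, hm1⟩ : ∃ m,
      PySem.List.max? ((es.foldl (fun d p => d.insert p.1 p.2) PySem.Dict.empty).keys) (fun k => k) = some m := by
    cases h : PySem.List.max? ((es.foldl (fun d p => d.insert p.1 p.2) PySem.Dict.empty).keys) (fun k => k) with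
    | none =>
      exfalso
      have hk : m2 ∈ (es.foldl (fun d p => d.insert p.1 p.2) PySem.Dict.empty).keys :=
        (hkeys m2).2 (PySem.List.max?_mem hm2)
      rw [(PySem.List.max?_eq_none_iff _ _).1 h] at hk
      exact absurd hk List.not_mem_nil
    | some m => exact ⟨m, rfl⟩
  rw [hm1, hm2]
  simp only [Option.getD_some]
  have h12 : m1 ≤ m2 := by
    simpa using PySem.List.max?_isMax hm2 m1 ((hkeys m1).1 (PySem.List.max?_mem hm1))
  have h21 : m2 ≤ m1 := by
    simpa using PySem.List.max?_isMax hm1 m2 ((hkeys m2).2 (PySem.List.max?_mem hm2))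
  omega

-- a lookup in the fold-built dict is the last matching entry (or the default)
theorem pvGetD_fold (es : List (Int × String)) (d : PySem.Dict Int String) (k : Int) (dflt : String) :
    (es.foldl (fun d p => d.insert p.1 p.2) d).getD k dflt
      = es.foldl (fun r p => if p.1 = k then p.2 else r) (d.getD k dflt) := by
  induction es generalizing d with
  | nil => rfl
  | cons p es ih =>
    simp only [List.foldl_cons]
    rw [ih, PySem.Dict.getD_insert]
    split_ifs with h h' h'
    · rfl
    · exact absurd h.symm h'
    · exact absurd h'.symm h
    · rfl

-- ===== VERDICT (by name: the statement is the Claim_ definition above) =====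
theorem parse_signature_key_spec : Claim_equal_parse_signature_key := by
  intro sk tc _
  unfold Spec_parse_signature_key parse_signature_key parse_signature_key_alt
  by_cases hf : sk = "implicit:founder"
  · rw [if_pos hf, if_pos hf]
  · rw [if_neg hf, if_neg hf]
    simp only []
    set parts := (PySem.Str.split? sk "|").getD [] with hparts
    have hA := pvFoldA_eq parts PySem.Dict.empty
    have hM : parts.foldl pvMaxStepB (-1)
        = (pvEntries parts).foldl (fun m p => if p.1 > m then p.1 else m) (-1) := by
      have h : parts.foldl pvMaxStepB (-1)
          = parts.foldl (fun m part => match pvParsedB part with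
              | none => m
              | some p => if p.1 > m then p.1 else m) (-1) := by
        rfl
      rw [h, pvFold_via_entries]
    by_cases he : pvEntries parts = []
    · have hsz : (parts.foldl pvStepA PySem.Dict.empty).size = 0 := by
        rw [hA, he]; rfl
      have hmx : parts.foldl pvMaxStepB (-1) < 0 := by
        rw [hM, he]; norm_num
      rw [if_pos hsz, if_pos hmx]
    · have hnn := pvEntries_nonneg parts
      have hsz : ¬ (parts.foldl pvStepA PySem.Dict.empty).size = 0 := by
        rw [hA, pvSize_fold_zero]
        rintro ⟨h, _⟩; exact he h
      have hmaxv := pvFoldMax_eq_max? (pvEntries parts) he hnn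
      have hmx : ¬ parts.foldl pvMaxStepB (-1) < 0 := by
        rw [hM, hmaxv]
        obtain ⟨p, hp⟩ := List.exists_mem_of_ne_nil _ he
        obtain ⟨m2, hm2⟩ : ∃ m, PySem.List.max? ((pvEntries parts).map Prod.fst) (fun k => k) = some m := by
          cases h : PySem.List.max? ((pvEntries parts).map Prod.fst) (fun k => k) with
          | none => exact absurd ((PySem.List.max?_eq_none_iff _ _).1 h) (by simpa using he)
          | some m => exact ⟨m, rfl⟩
        rw [hm2, Option.getD_some]
        obtain ⟨q, hq, hqe⟩ := List.mem_map.1 (PySem.List.max?_mem hm2)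
        have h0 : (0 : Int) ≤ m2 := hqe ▸ hnn q hq
        omega
      rw [if_neg hsz, if_neg hmx]
      -- same length: the two maxima agree
      have hN : (PySem.List.max? ((parts.foldl pvStepA PySem.Dict.empty).keys) (fun k => k)).getD 0
          = parts.foldl pvMaxStepB (-1) := by
        rw [hA, hM, hmaxv, pvMax_eq _ he]
      rw [hN]
      -- A's append loop is a map over the range
      have hstep : (fun (states : List String) (index : Int) =>
          if index = 0 then states ++ [(parts.foldl pvStepA PySem.Dict.empty).getD index "present"]
          else states ++ [(parts.foldl pvStepA PySem.Dict.empty).getD index "unknown"])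
          = fun states index => states ++
              [(parts.foldl pvStepA PySem.Dict.empty).getD index (if index = 0 then "present" else "unknown")] := by
        funext st i
        split_ifs <;> rfl
      rw [hstep, PySem.List.foldl_append_singleton_eq_map, List.nil_append]
      -- pointwise: a dict lookup is B's state_at
      apply List.map_congr_left
      intro i _
      rw [hA, pvGetD_fold]
      have hd0 : PySem.Dict.getD (PySem.Dict.empty : PySem.Dict Int String) i
          (if i = 0 then "present" else "unknown") = (if i = 0 then "present" else "unknown") := by
        simp [PySem.Dict.getD, PySem.Dict.get?, PySem.Dict.empty]
      rw [hd0]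
      unfold pvStateAtB
      have h : parts.foldl (fun result part =>
          match pvParsedB part with
          | none => result
          | some entry => if entry.1 = i then entry.2 else result)
          (if i = 0 then "present" else "unknown")
          = (pvEntries parts).foldl (fun r p => if p.1 = i then p.2 else r)
              (if i = 0 then "present" else "unknown") := pvFold_via_entries _ _ _
      rw [h]
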